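-- pv_equiv track=rewrite | github.com/THSPSS/Plus-One | Number_of_good_pairs.py | otherNumIdenticalPairs
-- ===== SOURCE A (Python) =====
-- from typing import List
--
-- def otherNumIdenticalPairs(nums: List[int]) -> int:
--
--     # number of good pairs
--     repeat = {}
--     num = 0
--
--     # for every element in nums
--     for v in nums:
--
--         # number of repeated digits
--         if v in repeat:
--
--             # count number of pairs based on duplicate values
--             if repeat[v] == 1:
--                 num += 1
--             else:
--                 num += repeat[v]
--
--             # increment the number of counts
--             repeat[v] += 1
--         # number has not been seen before
--         else:
--             repeat[v] = 1
--     # return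
--     return num
-- ===== SOURCE B (Python) =====
-- from typing import List
--
-- def otherNumIdenticalPairs(nums: List[int]) -> int:
--     # frequency table first, then one combinatorial pass over the counts
--     freq = {}
--     for v in nums:
--         freq[v] = freq.get(v, 0) + 1
--     return sum(c * (c - 1) // 2 for c in freq.values())
-- ===== Notes on version B (the rewrite author's own statement) =====
-- stated objective: simpler
-- what changed: Replaces A's per-element incremental pair accumulation (branching on the running count) with a plain frequency table built in one loop followed by a separate combinatorial pass summing c*(c-1)//2 over the counts.
import Mathlib
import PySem

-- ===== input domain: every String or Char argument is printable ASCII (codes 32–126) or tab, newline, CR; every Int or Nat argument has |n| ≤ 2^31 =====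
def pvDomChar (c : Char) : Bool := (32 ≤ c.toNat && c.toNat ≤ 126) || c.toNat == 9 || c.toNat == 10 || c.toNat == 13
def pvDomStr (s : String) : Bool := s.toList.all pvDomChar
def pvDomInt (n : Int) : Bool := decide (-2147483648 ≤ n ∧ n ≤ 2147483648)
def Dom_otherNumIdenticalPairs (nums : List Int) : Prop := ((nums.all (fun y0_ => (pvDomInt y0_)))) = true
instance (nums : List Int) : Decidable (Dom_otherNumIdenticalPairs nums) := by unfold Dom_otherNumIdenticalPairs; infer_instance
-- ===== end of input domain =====

-- B replaces A's per-element incremental pair accumulation with a frequency table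
-- built in one loop followed by a separate pass summing c*(c-1)//2 over the counts (objective: simpler).

-- ===== PORT A =====
-- literal transliteration of A: one loop carrying (repeat, num); branch order preserved
def otherNumIdenticalPairs (nums : List Int) : Int :=
  (nums.foldl
    (fun st v =>
      if st.1.contains v then
        (st.1.insert v (st.1.getD v 0 + 1),
         st.2 + (if st.1.getD v 0 = 1 then 1 else st.1.getD v 0))
      else
        (st.1.insert v 1, st.2))
    ((PySem.Dict.empty : PySem.Dict Int Int), (0 : Int))).2

-- ===== PORT B =====
-- literal transliteration of B: build freq with get(v,0)+1, then sum c*(c-1)//2 over values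
def otherNumIdenticalPairs_alt (nums : List Int) : Int :=
  let freq := nums.foldl (fun d v => d.insert v (d.getD v 0 + 1))
    ((PySem.Dict.empty : PySem.Dict Int Int))
  (freq.values.map (fun c => PySem.Int.floordiv (c * (c - 1)) 2)).sum

-- ===== PRECONDITION & SPEC =====
def Spec_otherNumIdenticalPairs (nums : List Int) (out : Int) : Prop := out = otherNumIdenticalPairs_alt nums
instance (nums : List Int) (out : Int) : Decidable (Spec_otherNumIdenticalPairs nums out) := by unfold Spec_otherNumIdenticalPairs; infer_instance

-- ===== CLAIM (what is proved, stated in full; the proofs are below) =====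
def Claim_equal_otherNumIdenticalPairs : Prop := ∀ (nums : List Int), Dom_otherNumIdenticalPairs nums → Spec_otherNumIdenticalPairs nums (otherNumIdenticalPairs nums)

-- ===== LEMMAS AND PROOFS =====

-- per-count contribution
def pvF (c : Int) : Int := PySem.Int.floordiv (c * (c - 1)) 2

def pvS (d : PySem.Dict Int Int) : Int := ((d.values).map pvF).sum

-- c*(c-1)//2 increases by exactly k when the count goes from k to k+1
theorem pvF_succ (k : Int) : pvF (k + 1) = pvF k + k := by
  obtain ⟨m, hm⟩ : Even (k * (k - 1)) := Int.even_mul_pred_self k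
  have h1 : k * (k - 1) = 2 * m := by linarith
  have h2 : (k + 1) * (k + 1 - 1) = 2 * (m + k) := by nlinarith
  simp only [pvF, PySem.Int.floordiv_eq_ediv_of_pos (by norm_num : (0:Int) < 2), h1, h2]
  rw [Int.mul_ediv_cancel_left _ (by norm_num), Int.mul_ediv_cancel_left _ (by norm_num)]

-- replacing the unique item with key v (value k) by (v, k+1) adds k to the value sum
theorem pv_sum_replace (l : List (Int × Int)) (v k : Int)
    (hnd : (l.map Prod.fst).Nodup) (hmem : (v, k) ∈ l) :
    ((((l.map (fun p => if p.1 == v then (v, k + 1) else p)).map (fun p => p.2)).map pvF)).sum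
      = (((l.map (fun p => p.2)).map pvF)).sum + k := by
  induction l with
  | nil => cases hmem
  | cons a l ih =>
    simp only [List.map_cons, List.nodup_cons] at hnd
    rcases List.mem_cons.mp hmem with h | h
    · subst h
      have hv : v ∉ l.map Prod.fst := by simpa using hnd.1
      have hrest : l.map (fun p => if p.1 == v then (v, k + 1) else p) = l.map id := by
        apply List.map_congr_left
        intro p hp
        have hne : p.1 ≠ v := by
          intro he
          exact hv (he ▸ List.mem_map_of_mem hp)
        simp [hne]
      rw [List.map_cons, hrest, List.map_id]
      simp only [beq_self_eq_true, if_true, List.map_cons, List.sum_cons, pvF_succ]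
      ring
    · have hav : ¬ ((a.1 == v) = true) := by
        simp only [beq_iff_eq]
        intro he
        have : v ∈ l.map Prod.fst := List.mem_map_of_mem h
        exact hnd.1 (he ▸ this)
      rw [List.map_cons, if_neg hav, List.map_cons, List.map_cons, List.sum_cons,
        List.map_cons, List.map_cons, List.sum_cons, ih hnd.2 h]
      ring

-- one counting step changes pvS by the current count of v (0 when v is fresh)
theorem pvS_step (d : PySem.Dict Int Int) (v : Int) (hnd : d.keys.Nodup) :
    pvS (d.insert v (d.getD v 0 + 1))
      = pvS d + (if d.contains v then d.getD v 0 else 0) := by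
  by_cases hc : d.contains v
  · obtain ⟨k, hk⟩ : ∃ k, d.get? v = some k := by
      rw [PySem.Dict.contains_eq_isSome_get?] at hc
      exact Option.isSome_iff_exists.mp hc
    have hgd : d.getD v 0 = k := PySem.Dict.getD_of_get?_eq_some d 0 hk
    have hmem : (v, k) ∈ d.items := PySem.Dict.mem_items_of_get?_eq_some d hk
    simp only [hc, if_true, pvS, PySem.Dict.values, hgd,
      PySem.Dict.items_insert_of_contains d (k + 1) hc]
    exact pv_sum_replace d.items v k hnd hmem
  · have hcf : d.contains v = false := by simpa using hc
    have hgd : d.getD v 0 = 0 := PySem.Dict.getD_of_not_contains d 0 hcf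
    simp only [hc, pvS, PySem.Dict.values,
      PySem.Dict.items_insert_of_not_contains d _ hcf]
    have h1 : pvF (d.getD v 0 + 1) = 0 := by rw [hgd]; decide
    simp [h1]

-- loop invariant: A's accumulator advances by exactly the growth of pvS along B's table
theorem pv_loop (l : List Int) (d : PySem.Dict Int Int) (n : Int) (hnd : d.keys.Nodup) :
    (l.foldl
      (fun st v =>
        if st.1.contains v then
          (st.1.insert v (st.1.getD v 0 + 1),
           st.2 + (if st.1.getD v 0 = 1 then 1 else st.1.getD v 0))
        else
          (st.1.insert v 1, st.2))
      (d, n)).2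
    = n + pvS (l.foldl (fun d v => d.insert v (d.getD v 0 + 1)) d) - pvS d := by
  induction l generalizing d n with
  | nil => simp
  | cons v l ih =>
    simp only [List.foldl_cons]
    by_cases hc : d.contains v
    · have hinc : (if d.getD v 0 = 1 then (1:Int) else d.getD v 0) = d.getD v 0 := by
        split_ifs with h1
        · omega
        · rfl
      simp only [hc, if_true, hinc]
      rw [ih _ _ (PySem.Dict.nodup_keys_insert _ _ _ hnd)]
      have hs := pvS_step d v hnd
      simp only [hc, if_true] at hs
      rw [hs]; ring
    · have hcf : d.contains v = false := by simpa using hc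
      have hgd : d.getD v 0 = 0 := PySem.Dict.getD_of_not_contains d 0 hcf
      have hd1 : d.insert v 1 = d.insert v (d.getD v 0 + 1) := by rw [hgd]; norm_num
      simp only [hcf, Bool.false_eq_true, if_false, hd1]
      rw [ih _ _ (PySem.Dict.nodup_keys_insert _ _ _ hnd)]
      have hs : pvS (d.insert v (d.getD v 0 + 1)) = pvS d := by
        rw [pvS_step d v hnd, hcf]; simp
      rw [hs]

-- ===== VERDICT (by name: the statement is the Claim_ definition above) =====
theorem otherNumIdenticalPairs_spec : Claim_equal_otherNumIdenticalPairs := by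
  intro nums _
  unfold Spec_otherNumIdenticalPairs otherNumIdenticalPairs otherNumIdenticalPairs_alt
  rw [pv_loop nums PySem.Dict.empty 0 (PySem.Dict.nodup_keys_empty)]
  have he : pvS PySem.Dict.empty = 0 := by rfl
  have hf : (fun c => PySem.Int.floordiv (c * (c - 1)) 2) = pvF := rfl
  simp only [he, hf]
  rw [zero_add, sub_zero]
  rfl
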